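-- pv_equiv track=rewrite | github.com/Excelsior2026/ensemble-software-engineering | ese/pipeline.py | _normalize_role_order
-- ===== SOURCE A (Python) =====
-- from typing import Any, Callable, Dict, Mapping, Protocol
--
-- PIPELINE_ORDER = [
--     "architect",
--     "implementer",
--     "adversarial_reviewer",
--     "security_auditor",
--     "test_generator",
--     "performance_analyst",
--     "documentation_writer",
--     "devops_sre",
--     "database_engineer",
--     "release_manager",
-- ]
--
-- class PipelineError(RuntimeError):
--     """Raised when pipeline configuration or adapter execution fails."""
--
-- def _normalize_role_order(cfg: Dict[str, Any]) -> list[str]: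
--     roles_cfg = cfg.get("roles") or {}
--     if not isinstance(roles_cfg, dict):
--         raise PipelineError("roles must be a mapping of role names to role configs")
--
--     configured_roles = list(roles_cfg.keys())
--     if not configured_roles:
--         return []
--
--     ordered: list[str] = [role for role in PIPELINE_ORDER if role in configured_roles]
--     ordered.extend(role for role in configured_roles if role not in ordered)
--     return ordered
-- ===== SOURCE B (Python) =====
-- PIPELINE_ORDER = [
--     "architect",
--     "implementer",
--     "adversarial_reviewer",
--     "security_auditor",
--     "test_generator",
--     "performance_analyst",
--     "documentation_writer",
--     "devops_sre",
--     "database_engineer",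
--     "release_manager",
-- ]
--
-- def _normalize_role_order(cfg):
--     roles_cfg = cfg.get("roles") or {}
--     pos = {role: i for i, role in enumerate(PIPELINE_ORDER)}
--     sentinel = len(PIPELINE_ORDER)
--     return sorted(roles_cfg, key=lambda r: pos.get(r, sentinel))
-- ===== Notes on version B (the rewrite author's own statement) =====
-- stated objective: idiomatic
-- what changed: Replaces A's two passes (a scan of PIPELINE_ORDER with membership tests plus a lazily-growing extend) by one stable sort of the configured roles keyed by a precomputed position map with a constant sentinel for unknown roles.
import Mathlib
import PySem

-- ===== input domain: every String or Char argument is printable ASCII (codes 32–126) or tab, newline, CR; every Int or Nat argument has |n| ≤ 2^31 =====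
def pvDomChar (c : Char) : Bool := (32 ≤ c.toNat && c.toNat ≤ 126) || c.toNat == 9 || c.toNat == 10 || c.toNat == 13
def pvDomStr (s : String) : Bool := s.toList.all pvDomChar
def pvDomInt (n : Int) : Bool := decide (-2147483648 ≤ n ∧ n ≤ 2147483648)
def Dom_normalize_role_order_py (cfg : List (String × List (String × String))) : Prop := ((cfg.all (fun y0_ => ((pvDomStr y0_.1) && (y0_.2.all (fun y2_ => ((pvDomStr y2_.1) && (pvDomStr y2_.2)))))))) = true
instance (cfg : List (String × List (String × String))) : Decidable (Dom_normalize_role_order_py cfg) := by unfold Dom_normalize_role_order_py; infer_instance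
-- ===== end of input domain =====

-- B replaces A's two passes (scan of PIPELINE_ORDER + lazily-growing extend) by one stable sort
-- keyed on a precomputed position map with a sentinel for unknown roles (objective: idiomatic).

-- ===== PORT A =====
def pvPipelineOrder : List String :=
  ["architect", "implementer", "adversarial_reviewer", "security_auditor", "test_generator",
   "performance_analyst", "documentation_writer", "devops_sre", "database_engineer", "release_manager"]

-- Port of A. 'cfg.get("roles") or {}' = dict lookup with default {} (an empty dict is falsy, so
-- 'or' leaves [] as []). The isinstance guard never fires on the typed domain (the value is a
-- dict). list(roles_cfg.keys()) = the dict's keys, i.e. first occurrences in order.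
-- 'ordered.extend(gen)' consumes the generator lazily while appending, so 'role not in ordered'
-- tests the growing list: ported as a foldl whose membership test is against the accumulator.
def normalize_role_order_py (cfg : List (String × List (String × String))) : List String :=
  let roles_cfg : List (String × String) := ((PySem.Dict.mk cfg).get? "roles").getD []
  let configured_roles : List String := PySem.List.dedup (roles_cfg.map Prod.fst)
  if configured_roles = [] then []
  else
    let ordered : List String := pvPipelineOrder.filter (fun role => configured_roles.contains role)
    configured_roles.foldl (fun acc role => if acc.contains role then acc else acc ++ [role]) ordered

-- ===== PORT B =====
def normalize_role_order_py_alt (cfg : List (String × List (String × String))) : List String :=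
  let roles_cfg : List (String × String) := ((PySem.Dict.mk cfg).get? "roles").getD []
  let pos : PySem.Dict String Int :=
    (PySem.List.enumerate pvPipelineOrder).foldl (fun d p => d.insert p.2 p.1) PySem.Dict.empty
  let sentinel : Int := (pvPipelineOrder.length : Int)
  PySem.List.sorted (PySem.List.dedup (roles_cfg.map Prod.fst)) (fun r => pos.getD r sentinel) false

-- ===== PRECONDITION & SPEC =====
def Spec_normalize_role_order_py (cfg : List (String × List (String × String))) (out : List String) : Prop := out = normalize_role_order_py_alt cfg
instance (cfg : List (String × List (String × String))) (out : List String) : Decidable (Spec_normalize_role_order_py cfg out) := by unfold Spec_normalize_role_order_py; infer_instance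

-- ===== CLAIM (what is proved, stated in full; the proofs are below) =====
def Claim_equal_normalize_role_order_py : Prop := ∀ (cfg : List (String × List (String × String))), Dom_normalize_role_order_py cfg → Spec_normalize_role_order_py cfg (normalize_role_order_py cfg)

-- ===== LEMMAS AND PROOFS =====

-- B's position map, as the port builds it.
def pvPos : PySem.Dict String Int :=
  (PySem.List.enumerate pvPipelineOrder).foldl (fun d p => d.insert p.2 p.1) PySem.Dict.empty

-- B's sort key written out as a decision chain over the ten literal roles.
theorem pvKey_ite (r : String) : pvPos.getD r 10 =
    if r = "release_manager" then 9 else if r = "database_engineer" then 8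
    else if r = "devops_sre" then 7 else if r = "documentation_writer" then 6
    else if r = "performance_analyst" then 5 else if r = "test_generator" then 4
    else if r = "security_auditor" then 3 else if r = "adversarial_reviewer" then 2
    else if r = "implementer" then 1 else if r = "architect" then 0 else 10 := by
  simp only [pvPos, pvPipelineOrder, PySem.List.enumerate_cons, PySem.List.enumerate_nil,
    List.foldl_cons, List.foldl_nil]
  simp only [PySem.Dict.getD_insert, PySem.Dict.getD_empty]
  norm_num

-- insertBy into a list split at the insertion point drops the element in the middle.
theorem insertBy_middle {α : Type} (before : α → α → Bool) (a : α) (ys1 ys2 : List α)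
    (h1 : ∀ y ∈ ys1, before a y = false) (h2 : ∀ y ∈ ys2, before a y = true) :
    PySem.List.insertBy before a (ys1 ++ ys2) = ys1 ++ a :: ys2 := by
  induction ys1 with
  | nil =>
    cases ys2 with
    | nil => rfl
    | cons y t => simp [PySem.List.insertBy, h2 y (by simp)]
  | cons z zs ih =>
    simp only [List.cons_append, PySem.List.insertBy, h1 z (by simp)]
    simp only [Bool.false_eq_true, if_false, List.cons.injEq, true_and]
    exact ih (fun y hy => h1 y (by simp [hy]))

theorem flatMap_congr {α β : Type} {f g : α → List β} {l : List α}
    (h : ∀ x ∈ l, f x = g x) : l.flatMap f = l.flatMap g := by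
  induction l with
  | nil => rfl
  | cons x t ih =>
    simp only [List.flatMap_cons, h x (by simp), ih (fun y hy => h y (by simp [hy]))]

-- A stable sort whose key values lie in [0, n) is the concatenation of the key buckets.
theorem sorted_buckets {α : Type} (key : α → Int) (n : ℕ) (L : List α)
    (hb : ∀ x ∈ L, 0 ≤ key x ∧ key x < n) :
    PySem.List.sorted L key false =
      (List.range n).flatMap (fun (i : ℕ) => L.filter (fun x => decide (key x = (i : Int)))) := by
  induction L using List.reverseRecOn with
  | nil => simp [PySem.List.sorted_eq_foldl_insertBy]
  | append_singleton L a ih =>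
    have hbL : ∀ x ∈ L, 0 ≤ key x ∧ key x < n := fun x hx => hb x (by simp [hx])
    have hba := hb a (by simp)
    set k : ℕ := (key a).toNat with hkdef
    have hk : (k : Int) = key a := Int.toNat_of_nonneg hba.1
    have hkn : k < n := by omega
    have hstep : PySem.List.sorted (L ++ [a]) key false
        = PySem.List.insertBy (fun x y => decide (key x < key y)) a (PySem.List.sorted L key false) := by
      rw [PySem.List.sorted_eq_foldl_insertBy, PySem.List.sorted_eq_foldl_insertBy, List.foldl_append]
      rfl
    rw [hstep, ih hbL]
    have hsplit : n = (k + 1) + (n - (k + 1)) := by omega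
    rw [hsplit, List.range_add, List.flatMap_append, List.flatMap_append]
    rw [insertBy_middle]
    · -- rebuild the right-hand side
      have hbuck : ∀ i : ℕ, i ≠ k →
          (L ++ [a]).filter (fun x => decide (key x = (i : Int)))
            = L.filter (fun x => decide (key x = (i : Int))) := by
        intro i hi
        rw [List.filter_append]
        have : (decide (key a = (i : Int))) = false := by
          simp only [decide_eq_false_iff_not]
          omega
        simp [this]
      have h1 : (List.range (k + 1)).flatMap
            (fun (i : ℕ) => (L ++ [a]).filter (fun x => decide (key x = (i : Int))))
          = (List.range k).flatMap (fun (i : ℕ) => L.filter (fun x => decide (key x = (i : Int))))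
            ++ (L.filter (fun x => decide (key x = (k : Int))) ++ [a]) := by
        rw [List.range_succ, List.flatMap_append]
        simp only [List.flatMap_cons, List.flatMap_nil, List.append_nil]
        rw [flatMap_congr (fun i hi => hbuck i (by simp at hi; omega))]
        rw [List.filter_append]
        have : (decide (key a = (k : Int))) = true := by simp [hk]
        simp [this]
      have h3 : (List.map (fun x => (k + 1) + x) (List.range (n - (k + 1)))).flatMap
            (fun (i : ℕ) => (L ++ [a]).filter (fun x => decide (key x = (i : Int))))
          = (List.map (fun x => (k + 1) + x) (List.range (n - (k + 1)))).flatMap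
            (fun (i : ℕ) => L.filter (fun x => decide (key x = (i : Int)))) := by
        apply flatMap_congr; intro i hi
        simp only [List.mem_map] at hi
        obtain ⟨j, _, rfl⟩ := hi
        exact hbuck _ (by omega)
      rw [h1, h3]
      have h2 : (List.range (k + 1)).flatMap
            (fun (i : ℕ) => L.filter (fun x => decide (key x = (i : Int))))
          = (List.range k).flatMap (fun (i : ℕ) => L.filter (fun x => decide (key x = (i : Int))))
            ++ L.filter (fun x => decide (key x = (k : Int))) := by
        rw [List.range_succ, List.flatMap_append]
        simp
      rw [h2]
      simp [List.append_assoc]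
    · intro y hy
      rw [List.range_succ, List.flatMap_append] at hy
      simp only [List.mem_append, List.mem_flatMap, List.mem_range, List.mem_filter,
        decide_eq_true_eq, List.flatMap_cons, List.flatMap_nil, List.append_nil] at hy
      rcases hy with ⟨i, hi, _, hkey⟩ | ⟨_, hkey⟩ <;>
        simp only [decide_eq_false_iff_not, not_lt, hkey] <;> omega
    · intro y hy
      simp only [List.mem_flatMap, List.mem_map, List.mem_filter, decide_eq_true_eq] at hy
      obtain ⟨i, ⟨j, _, rfl⟩, _, hkey⟩ := hy
      simp only [decide_eq_true_eq, hkey]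
      push_cast
      omega

-- A's lazy 'extend' loop appends exactly the elements not already present (L has no duplicates).
theorem foldl_extend (L : List String) : ∀ acc : List String, L.Nodup →
    L.foldl (fun acc role => if acc.contains role then acc else acc ++ [role]) acc
      = acc ++ L.filter (fun r => !acc.contains r) := by
  induction L with
  | nil => simp
  | cons x t ih =>
    intro acc hnd
    simp only [List.nodup_cons] at hnd
    by_cases hx : acc.contains x
    · have hm : x ∈ acc := List.mem_of_elem_eq_true hx
      rw [List.foldl_cons, if_pos hx, ih acc hnd.2, List.filter_cons]
      simp [hm]
    · rw [List.foldl_cons, if_neg hx, ih (acc ++ [x]) hnd.2, List.filter_cons]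
      have ht : t.filter (fun r => !(acc ++ [x]).contains r) = t.filter (fun r => !acc.contains r) := by
        apply List.filter_congr
        intro y hy
        have hyx : y ≠ x := fun h => hnd.1 (h ▸ hy)
        simp [hyx]
      rw [ht]
      have hm : x ∉ acc := fun h => hx (List.elem_eq_true_of_mem h)
      simp [hm]

-- filter by equality with p on a duplicate-free list keeps at most the one occurrence of p
theorem filter_eq_singleton (p : String) (L : List String) (hnd : L.Nodup) :
    L.filter (fun x => decide (x = p)) = if L.contains p then [p] else [] := by
  induction L with
  | nil => simp
  | cons x t ih =>
    simp only [List.nodup_cons] at hnd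
    by_cases hx : x = p
    · subst hx
      have ht : t.filter (fun y => decide (y = x)) = [] := by
        rw [List.filter_eq_nil_iff]
        intro y hy
        simp only [decide_eq_true_eq]
        exact fun h => hnd.1 (h ▸ hy)
      simp [ht]
    · rw [List.filter_cons]
      simp only [decide_eq_true_eq, hx, if_false]
      rw [ih hnd.2]
      simp [Ne.symm hx]

theorem pv_key_bound (L : List String) :
    ∀ x ∈ L, 0 ≤ pvPos.getD x 10 ∧ pvPos.getD x 10 < (11 : ℕ) := by
  intro x _
  rw [pvKey_ite]
  split_ifs <;> norm_num

-- bucket i of the sort, i < 10: the single known role at pipeline position i, if configured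
theorem pv_bucket (L : List String) (hnd : L.Nodup) (i : ℕ) (p : String)
    (hiff : ∀ x : String, pvPos.getD x 10 = (i : Int) ↔ x = p) :
    L.filter (fun x => decide (pvPos.getD x 10 = (i : Int)))
      = if L.contains p then [p] else [] := by
  have : (fun x => decide (pvPos.getD x 10 = (i : Int))) = (fun x => decide (x = p)) := by
    funext x
    simp only [decide_eq_decide]
    exact hiff x
  rw [this, filter_eq_singleton p L hnd]

theorem pv_iff0 : ∀ x : String, pvPos.getD x 10 = ((0 : ℕ) : Int) ↔ x = "architect" := by
  intro x; rw [pvKey_ite]; split_ifs <;> simp_all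
theorem pv_iff1 : ∀ x : String, pvPos.getD x 10 = ((1 : ℕ) : Int) ↔ x = "implementer" := by
  intro x; rw [pvKey_ite]; split_ifs <;> simp_all
theorem pv_iff2 : ∀ x : String, pvPos.getD x 10 = ((2 : ℕ) : Int) ↔ x = "adversarial_reviewer" := by
  intro x; rw [pvKey_ite]; split_ifs <;> simp_all
theorem pv_iff3 : ∀ x : String, pvPos.getD x 10 = ((3 : ℕ) : Int) ↔ x = "security_auditor" := by
  intro x; rw [pvKey_ite]; split_ifs <;> simp_all
theorem pv_iff4 : ∀ x : String, pvPos.getD x 10 = ((4 : ℕ) : Int) ↔ x = "test_generator" := by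
  intro x; rw [pvKey_ite]; split_ifs <;> simp_all
theorem pv_iff5 : ∀ x : String, pvPos.getD x 10 = ((5 : ℕ) : Int) ↔ x = "performance_analyst" := by
  intro x; rw [pvKey_ite]; split_ifs <;> simp_all
theorem pv_iff6 : ∀ x : String, pvPos.getD x 10 = ((6 : ℕ) : Int) ↔ x = "documentation_writer" := by
  intro x; rw [pvKey_ite]; split_ifs <;> simp_all
theorem pv_iff7 : ∀ x : String, pvPos.getD x 10 = ((7 : ℕ) : Int) ↔ x = "devops_sre" := by
  intro x; rw [pvKey_ite]; split_ifs <;> simp_all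
theorem pv_iff8 : ∀ x : String, pvPos.getD x 10 = ((8 : ℕ) : Int) ↔ x = "database_engineer" := by
  intro x; rw [pvKey_ite]; split_ifs <;> simp_all
theorem pv_iff9 : ∀ x : String, pvPos.getD x 10 = ((9 : ℕ) : Int) ↔ x = "release_manager" := by
  intro x; rw [pvKey_ite]; split_ifs <;> simp_all

-- bucket 10: the configured roles that are not pipeline roles, in configuration order
theorem pv_bucket10 (L : List String) :
    L.filter (fun x => decide (pvPos.getD x 10 = ((10 : ℕ) : Int)))
      = L.filter (fun r => !pvPipelineOrder.contains r) := by
  apply List.filter_congr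
  intro x _
  rw [pvKey_ite]
  split_ifs with h0 h1 h2 h3 h4 h5 h6 h7 h8 h9
  · simp [h0, pvPipelineOrder]
  · simp [h1, pvPipelineOrder]
  · simp [h2, pvPipelineOrder]
  · simp [h3, pvPipelineOrder]
  · simp [h4, pvPipelineOrder]
  · simp [h5, pvPipelineOrder]
  · simp [h6, pvPipelineOrder]
  · simp [h7, pvPipelineOrder]
  · simp [h8, pvPipelineOrder]
  · simp [h9, pvPipelineOrder]
  · simp [pvPipelineOrder, h0, h1, h2, h3, h4, h5, h6, h7, h8, h9]

theorem pv_ite_append (c : Prop) [Decidable c] (a b u : List String) :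
    (if c then a else b) ++ u = if c then a ++ u else b ++ u := by
  split <;> rfl

-- heart of the equivalence: on a duplicate-free list, B's stable sort is A's two passes
set_option maxHeartbeats 1600000 in
theorem pv_core (L : List String) (hnd : L.Nodup) :
    PySem.List.sorted L (fun r => pvPos.getD r 10) false
      = pvPipelineOrder.filter (fun role => L.contains role)
        ++ L.filter (fun r => !pvPipelineOrder.contains r) := by
  rw [sorted_buckets _ 11 L (pv_key_bound L)]
  have hr : List.range 11 = [0, 1, 2, 3, 4, 5, 6, 7, 8, 9, 10] := by decide
  rw [hr]
  simp only [List.flatMap_cons, List.flatMap_nil, List.append_nil]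
  rw [pv_bucket L hnd 0 _ pv_iff0, pv_bucket L hnd 1 _ pv_iff1, pv_bucket L hnd 2 _ pv_iff2,
    pv_bucket L hnd 3 _ pv_iff3, pv_bucket L hnd 4 _ pv_iff4, pv_bucket L hnd 5 _ pv_iff5,
    pv_bucket L hnd 6 _ pv_iff6, pv_bucket L hnd 7 _ pv_iff7, pv_bucket L hnd 8 _ pv_iff8,
    pv_bucket L hnd 9 _ pv_iff9, pv_bucket10 L]
  simp only [pvPipelineOrder, List.filter_cons, List.filter_nil]
  simp only [pv_ite_append, List.cons_append, List.nil_append]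

-- ===== VERDICT (by name: the statement is the Claim_ definition above) =====
theorem normalize_role_order_py_spec : Claim_equal_normalize_role_order_py := by
  intro cfg _
  show normalize_role_order_py cfg = normalize_role_order_py_alt cfg
  have hL : ∀ P : List String → Prop,
      (∀ roles_cfg : List (String × String),
        P (PySem.List.dedup (roles_cfg.map Prod.fst))) →
      P (PySem.List.dedup (((((PySem.Dict.mk cfg).get? "roles").getD []) : List (String × String)).map Prod.fst)) :=
    fun P h => h _
  set L : List String :=
    PySem.List.dedup (((((PySem.Dict.mk cfg).get? "roles").getD []) : List (String × String)).map Prod.fst) with hLdef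
  have hnd : L.Nodup := PySem.List.nodup_dedup _
  have hA : normalize_role_order_py cfg
      = (if L = [] then []
         else L.foldl (fun acc role => if acc.contains role then acc else acc ++ [role])
           (pvPipelineOrder.filter (fun role => L.contains role))) := rfl
  have hB : normalize_role_order_py_alt cfg
      = PySem.List.sorted L (fun r => pvPos.getD r 10) false := rfl
  rw [hA, hB]
  by_cases hC : L = []
  · rw [if_pos hC, hC]
    rfl
  · rw [if_neg hC, foldl_extend L _ hnd, pv_core L hnd]
    congr 1
    apply List.filter_congr
    intro y hy
    have hcc : (pvPipelineOrder.filter (fun role => L.contains role)).contains y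
        = pvPipelineOrder.contains y := by
      by_cases hmem : y ∈ pvPipelineOrder
      · simp [List.mem_filter, hmem, hy]
      · simp [List.mem_filter, hmem]
    rw [hcc]
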